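-- pv_equiv track=rewrite | github.com/PythonAndGoCourses2/PythonHomework | mymodule.py | find_comparsion
-- ===== SOURCE A (Python) =====
-- def find_comparsion(stroka):
--     i1 = 0
--     lst = []
--     op = []
--     tup=('>', '<', '!', '=')
--     if  stroka[0] in tup or stroka[-1] in tup:
--         raise ValueError
--     for elem in stroka:
--         if '><=!'.find(elem)!= -1:
--             i2 = stroka.find(elem,i1)
--             lst.append(stroka[i1:i2])
--             op.append(elem)
--             i1 = i2 + 1
--     lst.append(stroka[i1:])
--     col = lst.count('')
--     while col != 0:
--         i = lst.index('')
--         del lst[i]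
--         op[i-1:i+1] = [op[i-1]+op[i]]
--         col -= 1
--     return [op, lst]
-- ===== SOURCE B (Python) =====
-- def find_comparsion(stroka):
--     ops = []
--     lst = []
--     buf = ''
--     for c in stroka:
--         if c in '><=!':
--             if buf == '' and ops:
--                 ops[-1] = ops[-1] + c
--             else:
--                 ops.append(c)
--                 lst.append(buf)
--             buf = ''
--         else:
--             buf = buf + c
--     lst.append(buf)
--     return [ops, lst]
-- ===== Notes on version B (the rewrite author's own statement) =====
-- stated objective: alternative
-- what changed: B replaces A's two-phase algorithm (split via repeated str.find with slicing, then a destructive while-loop that repeatedly searches lst.index('') and splices op with slice assignment) by a single left-to-right pass that keeps a running operand buffer and appends an operator to the still-open operator group when the buffer is empty; it trades A's C-level find/slice/index calls for one interpreted loop, so it is not measurably faster.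
import Mathlib
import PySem

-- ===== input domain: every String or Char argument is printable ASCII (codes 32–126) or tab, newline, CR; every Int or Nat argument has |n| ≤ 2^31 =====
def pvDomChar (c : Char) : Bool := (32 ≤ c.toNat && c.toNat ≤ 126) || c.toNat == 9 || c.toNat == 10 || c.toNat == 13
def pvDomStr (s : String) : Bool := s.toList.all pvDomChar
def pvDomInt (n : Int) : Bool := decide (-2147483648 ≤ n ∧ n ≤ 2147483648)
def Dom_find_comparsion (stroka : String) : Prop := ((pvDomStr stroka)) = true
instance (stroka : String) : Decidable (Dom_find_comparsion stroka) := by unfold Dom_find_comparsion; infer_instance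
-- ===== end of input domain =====

-- B replaces A's str.find/slice splitting plus a destructive index/del/slice-assignment merge loop by one
-- left-to-right pass with a running operand buffer (objective: alternative single-pass algorithm).

-- ===== PORT A =====
-- the body of A's 'for elem in stroka' loop; state = (i1, lst, op)
def fcStep (cs : List Char) (st : Int × List (List Char) × List (List Char)) (elem : Char) :
    Int × List (List Char) × List (List Char) :=
  if PySem.Chars.find ['>', '<', '=', '!'] [elem] != -1 then      -- '><=!'.find(elem) != -1
    let i2 := PySem.Chars.findFrom cs [elem] st.1                 -- stroka.find(elem, i1)
    (i2 + 1, st.2.1 ++ [PySem.List.slice cs (some st.1) (some i2)], st.2.2 ++ [[elem]])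
  else st

-- A's 'while col != 0' loop; the fuel is exactly col, decremented once per iteration
def fcMerge : Nat → List (List Char) → List (List Char) → List (List Char) × List (List Char)
  | 0, op, lst => (op, lst)
  | col + 1, op, lst =>
    match PySem.List.index? lst ([] : List Char) with
    | none => (op, lst)       -- unreachable: col > 0 guarantees '' ∈ lst
    | some i =>
      match PySem.List.pyGet? op ((i : Int) - 1), PySem.List.pyGet? op (i : Int) with
      | some a, some b =>
          -- op[i-1:i+1] = [op[i-1]+op[i]] is op[:i-1] ++ [op[i-1]+op[i]] ++ op[i+1:]
          fcMerge col
            (PySem.List.slice op none (some ((i : Int) - 1)) ++ [a ++ b] ++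
             PySem.List.slice op (some ((i : Int) + 1)) none)
            (lst.eraseIdx i)  -- del lst[i]
      | _, _ => (op, lst)     -- unreachable under Pre_ (Python would raise IndexError)

def find_comparsion (stroka : String) : List (List String) :=
  let cs := stroka.toList
  match PySem.List.pyGet? cs 0, PySem.List.pyGet? cs (-1) with   -- stroka[0], stroka[-1]
  | some c0, some cn =>
    if (['>', '<', '!', '='] : List Char).contains c0 ||
       (['>', '<', '!', '='] : List Char).contains cn then
      []                      -- Python: raise ValueError (excluded by Pre_)
    else
      let r := cs.foldl (fcStep cs) (0, [], [])
      let lst := r.2.1 ++ [PySem.List.slice cs (some r.1) none]   -- lst.append(stroka[i1:])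
      let col := PySem.List.count lst ([] : List Char)            -- lst.count('')
      let m := fcMerge col r.2.2 lst
      [m.1.map String.ofList, m.2.map String.ofList]
  | _, _ => []                -- Python: IndexError on '' (excluded by Pre_)

-- ===== PORT B =====
-- the body of B's single 'for c in stroka' loop; state = (ops, lst, buf)
def fcAltStep (st : List (List Char) × List (List Char) × List Char) (c : Char) :
    List (List Char) × List (List Char) × List Char :=
  if c == '>' || c == '<' || c == '=' || c == '!' then            -- c in '><=!'
    if st.2.2.isEmpty && !st.1.isEmpty then                       -- buf == '' and ops
      (st.1.dropLast ++ [(st.1.getLast?.getD []) ++ [c]], st.2.1, [])  -- ops[-1] = ops[-1] + c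
    else
      (st.1 ++ [[c]], st.2.1 ++ [st.2.2], [])
  else (st.1, st.2.1, st.2.2 ++ [c])                              -- buf = buf + c

def find_comparsion_alt (stroka : String) : List (List String) :=
  let r := stroka.toList.foldl fcAltStep ([], [], [])
  [r.1.map String.ofList, (r.2.1 ++ [r.2.2]).map String.ofList]

-- ===== PRECONDITION & SPEC =====
-- Pre_ excludes exactly the inputs where A raises: the empty string (IndexError on stroka[0]) and
-- strings whose first or last character is one of '>', '<', '!', '=' (explicit ValueError).
def Pre_find_comparsion (stroka : String) : Prop :=
  stroka.toList ≠ [] ∧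
  (stroka.toList.head?.toList ++ stroka.toList.getLast?.toList).all
    (fun c => !((['>', '<', '!', '='] : List Char).contains c)) = true
instance (stroka : String) : Decidable (Pre_find_comparsion stroka) := by
  unfold Pre_find_comparsion; infer_instance

def pvWitness_find_comparsion : String := "a<b"

def Spec_find_comparsion (stroka : String) (out : List (List String)) : Prop := out = find_comparsion_alt stroka
instance (stroka : String) (out : List (List String)) : Decidable (Spec_find_comparsion stroka out) := by unfold Spec_find_comparsion; infer_instance

-- ===== CLAIM (what is proved, stated in full; the proofs are below) =====
def Claim_equal_find_comparsion : Prop := ∀ (stroka : String), Dom_find_comparsion stroka → Pre_find_comparsion stroka → Spec_find_comparsion stroka (find_comparsion stroka)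

-- ===== LEMMAS AND PROOFS =====

-- the operator test both programs use, as one Bool
def opb (c : Char) : Bool := c == '>' || c == '<' || c == '=' || c == '!'

-- the operator characters of cs, each as a one-character string, in order
def opsOf (cs : List Char) : List (List Char) := (cs.filter opb).map (fun c => [c])

-- the (possibly empty) operand pieces of cs between/around its operator characters
def partsOf : List Char → List (List Char)
  | [] => [[]]
  | c :: cs =>
    if opb c then [] :: partsOf cs
    else
      match partsOf cs with
      | p :: ps => (c :: p) :: ps
      | [] => [[c]]

-- right-to-left grouping: given the operators and the operand pieces FOLLOWING each of them,
-- glue an operator onto the following group whenever the piece in between is empty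
def mrgQ : List (List Char) → List (List Char) → List (List Char) × List (List Char)
  | [], rest => ([], rest)
  | o :: os, rest =>
    let r := mrgQ os rest.tail
    if rest.headI = [] ∧ r.1 ≠ [] then ((o ++ r.1.headI) :: r.1.tail, r.2)
    else (o :: r.1, rest.headI :: r.2)

-- the common canonical value: operator groups and the operand pieces after the first one
def grpOf (cs : List Char) : List (List Char) × List (List Char) :=
  mrgQ (opsOf cs) (partsOf cs).tail

theorem partsOf_ne_nil (cs : List Char) : partsOf cs ≠ [] := by
  cases cs with
  | nil => simp [partsOf]
  | cons c cs =>
    simp only [partsOf]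
    split
    · simp
    · split <;> simp

theorem length_partsOf (cs : List Char) : (partsOf cs).length = (opsOf cs).length + 1 := by
  induction cs with
  | nil => simp [partsOf, opsOf]
  | cons c cs ih =>
    by_cases h : opb c = true
    · simp [partsOf, opsOf, h, ih]
    · simp only [Bool.not_eq_true] at h
      obtain ⟨p, ps, hp⟩ := List.exists_cons_of_ne_nil (partsOf_ne_nil cs)
      simp only [partsOf, opsOf, h, hp, List.filter_cons, Bool.false_eq_true, if_false] at *
      simpa [hp] using ih

theorem opb_false_iff (c : Char) : opb c = false ↔ c ∉ (['>', '<', '!', '='] : List Char) := by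
  simp [opb]; tauto

theorem find_test_eq (c : Char) : (PySem.Chars.find ['>', '<', '=', '!'] [c] != -1) = opb c := by
  simp [PySem.Chars.find, PySem.Chars.find.go, List.isPrefixOf, opb]
  by_cases h1 : c = '>' <;> by_cases h2 : c = '<' <;> by_cases h3 : c = '=' <;> by_cases h4 : c = '!' <;>
    simp [h1, h2, h3, h4]

theorem find_go_singleton (c : Char) (suf : List Char) : ∀ (buf : List Char) (k : Nat), c ∉ buf →
    PySem.Chars.find.go [c] (buf ++ c :: suf) k = ((k + buf.length : Nat) : Int)
  | [], k, _ => by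
    rw [PySem.Chars.find.go.eq_def]
    simp [List.isPrefixOf]
  | b :: buf, k, h => by
    have hb : (c == b) = false := by
      simp only [List.mem_cons, not_or] at h
      simp [h.1]
    rw [List.cons_append, PySem.Chars.find.go.eq_def]
    simp only [List.isPrefixOf, hb, Bool.false_and, Bool.false_eq_true, if_false]
    rw [find_go_singleton c suf buf (k + 1) (by simp only [List.mem_cons, not_or] at h; exact h.2)]
    simp only [List.length_cons]
    push_cast
    ring

theorem findFrom_at (q buf suf : List Char) (c : Char) (hb : c ∉ buf) :
    PySem.Chars.findFrom (q ++ (buf ++ c :: suf)) [c] (q.length : Int) = ((q.length + buf.length : Nat) : Int) := by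
  rw [PySem.Chars.findFrom_natCast _ _ q.length (by simp), List.drop_left]
  have hf : PySem.Chars.find (buf ++ c :: suf) [c] = ((0 + buf.length : Nat) : Int) :=
    find_go_singleton c suf buf 0 hb
  rw [hf]
  have hne : (((0 + buf.length : Nat) : Int)) ≠ -1 := by omega
  rw [if_neg hne]
  push_cast
  ring

theorem partsOf_cons_nop {c : Char} (h : opb c = false) (cs : List Char) :
    partsOf (c :: cs) = (c :: (partsOf cs).headI) :: (partsOf cs).tail := by
  obtain ⟨p, ps, hp⟩ := List.exists_cons_of_ne_nil (partsOf_ne_nil cs)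
  simp [partsOf, h, hp]

theorem partsOf_cons_op {c : Char} (h : opb c = true) (cs : List Char) :
    partsOf (c :: cs) = [] :: partsOf cs := by
  simp [partsOf, h]

theorem phase1 (cs : List Char) : ∀ (suf q buf : List Char) (lst op : List (List Char)),
    cs = q ++ (buf ++ suf) → (∀ b ∈ buf, opb b = false) →
    (let r := suf.foldl (fcStep cs) ((q.length : Int), lst, op)
     (r.2.2, r.2.1 ++ [PySem.List.slice cs (some r.1) none]))
    = (op ++ opsOf suf, lst ++ (buf ++ (partsOf suf).headI) :: (partsOf suf).tail) := by
  intro suf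
  induction suf with
  | nil =>
    intro q buf lst op hcs _
    simp only [List.foldl_nil, partsOf, opsOf, List.headI_cons, List.tail_cons]
    have hsl : PySem.List.slice cs (some (q.length : Int)) none = buf := by
      rw [PySem.List.slice_from cs (by positivity)]
      simp only [Int.toNat_natCast]
      rw [hcs, List.drop_left]
      simp
    simp [hsl]
  | cons c suf ih =>
    intro q buf lst op hcs hbuf
    rw [List.foldl_cons]
    by_cases hc : opb c = true
    · have hcnb : c ∉ buf := fun hmem => by simp [hbuf c hmem] at hc
      have hfind : PySem.Chars.findFrom cs [c] ((q.length : Nat) : Int) = ((q.length + buf.length : Nat) : Int) := by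
        rw [hcs]
        exact findFrom_at q buf suf c hcnb
      have hstep : fcStep cs ((q.length : Int), lst, op) c =
          ((((q ++ buf ++ [c]).length : Nat) : Int), lst ++ [buf], op ++ [[c]]) := by
        rw [fcStep]
        rw [if_pos (by rw [find_test_eq]; exact hc)]
        have hsl : PySem.List.slice cs (some ((q.length : Nat) : Int))
            (some ((q.length + buf.length : Nat) : Int)) = buf := by
          rw [PySem.List.slice_natCast]
          rw [hcs, List.drop_left]
          simp [List.take_left']
        have hadd : ((q.length + buf.length : Nat) : Int) + 1 = (((q ++ buf ++ [c]).length : Nat) : Int) := by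
          simp only [List.length_append, List.length_singleton]
          push_cast
          ring
        simp only [hfind, hsl, hadd]
      rw [hstep]
      have hrec := ih (q ++ buf ++ [c]) [] (lst ++ [buf]) (op ++ [[c]])
        (by rw [hcs]; simp) (by simp)
      simp only [List.nil_append] at hrec
      rw [hrec]
      have hops : opsOf (c :: suf) = [c] :: opsOf suf := by simp [opsOf, hc]
      rw [hops, partsOf_cons_op hc, List.headI_cons, List.tail_cons]
      obtain ⟨p, ps, hp⟩ := List.exists_cons_of_ne_nil (partsOf_ne_nil suf)
      simp [hp]
    · simp only [Bool.not_eq_true] at hc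
      have hstep : fcStep cs ((q.length : Int), lst, op) c = ((q.length : Int), lst, op) := by
        rw [fcStep, if_neg (by rw [find_test_eq, hc]; simp)]
      rw [hstep]
      have hrec := ih q (buf ++ [c]) lst op (by rw [hcs]; simp) (by
        intro b hb
        rcases List.mem_append.mp hb with h | h
        · exact hbuf b h
        · simp only [List.mem_singleton] at h; rw [h]; exact hc)
      rw [hrec]
      have hops : opsOf (c :: suf) = opsOf suf := by simp [opsOf, hc]
      rw [hops, partsOf_cons_nop hc, List.headI_cons, List.tail_cons]
      simp

theorem mrgQ_fst_ne_nil (o : List Char) (os rest : List (List Char)) : (mrgQ (o :: os) rest).1 ≠ [] := by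
  simp only [mrgQ]
  split <;> simp

theorem mrgQ_id : ∀ (os rest : List (List Char)), os.length = rest.length →
    (∀ p ∈ rest, p ≠ []) → mrgQ os rest = (os, rest) := by
  intro os
  induction os with
  | nil => intro rest _ _; rfl
  | cons o os ih =>
    intro rest hlen hne
    cases rest with
    | nil => simp at hlen
    | cons p rest' =>
      have hp : p ≠ [] := hne p (by simp)
      have hrec : mrgQ os rest' = (os, rest') :=
        ih rest' (by simpa using hlen) (fun x hx => hne x (by simp [hx]))
      simp [mrgQ, hrec, hp]

theorem mrgQ_splice : ∀ (oa pre : List (List Char)) (a b : List Char) (ob : List (List Char))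
    (s1 : List Char) (suf' : List (List Char)), oa.length = pre.length →
    mrgQ (oa ++ a :: b :: ob) (pre ++ [] :: s1 :: suf') = mrgQ (oa ++ (a ++ b) :: ob) (pre ++ s1 :: suf') := by
  intro oa
  induction oa with
  | nil =>
    intro pre a b ob s1 suf' hl
    have hpre : pre = [] := List.eq_nil_of_length_eq_zero (by simpa using hl.symm)
    subst hpre
    simp only [List.nil_append]
    rw [mrgQ, mrgQ]
    have hne := mrgQ_fst_ne_nil b ob (s1 :: suf')
    simp only [List.headI_cons, List.tail_cons]
    rw [if_pos (by exact ⟨by trivial, hne⟩)]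
    rw [mrgQ]
    simp only [List.headI_cons, List.tail_cons]
    by_cases hcond : s1 = [] ∧ (mrgQ ob suf').1 ≠ []
    · rw [if_pos hcond, if_pos hcond]
      simp [List.append_assoc]
    · rw [if_neg hcond, if_neg hcond]
      simp
  | cons o oa ih =>
    intro pre a b ob s1 suf' hl
    cases pre with
    | nil => simp at hl
    | cons p pre' =>
      simp only [List.cons_append]
      rw [mrgQ, mrgQ]
      simp only [List.headI_cons, List.tail_cons]
      rw [ih pre' a b ob s1 suf' (by simpa using hl)]

theorem eraseIdx_append_cons {α : Type} (l : List α) (x : α) (r : List α) :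
    (l ++ x :: r).eraseIdx l.length = l ++ r := by
  induction l with
  | nil => simp
  | cons y l ih => simp [ih]

theorem merge_eq : ∀ (col : Nat) (ops : List (List Char)) (p0 : List Char) (prest : List (List Char)),
    List.count [] (p0 :: prest) = col → p0 ≠ [] → ops.length = prest.length →
    (p0 :: prest).getLast? ≠ some [] →
    fcMerge col ops (p0 :: prest) = ((mrgQ ops prest).1, p0 :: (mrgQ ops prest).2) := by
  intro col
  induction col with
  | zero =>
    intro ops p0 prest hc hp0 hlen _
    have hmem : ([] : List Char) ∉ p0 :: prest := List.count_eq_zero.mp hc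
    rw [fcMerge, mrgQ_id ops prest hlen (by
      intro p hp he
      exact hmem (by rw [← he]; exact List.mem_cons_of_mem _ hp))]
  | succ col ih =>
    intro ops p0 prest hc hp0 hlen hlast
    have hmem : ([] : List Char) ∈ p0 :: prest := by
      by_contra h
      rw [List.count_eq_zero.mpr h] at hc
      omega
    obtain ⟨i, hi⟩ := Option.isSome_iff_exists.mp ((PySem.List.index?_isSome_iff _ _).mpr hmem)
    obtain ⟨pre, suf, hdecomp, hlenpre, hnotin⟩ := (PySem.List.index?_eq_some_iff _ _ _).mp hi
    cases pre with
    | nil =>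
      exfalso
      simp only [List.nil_append, List.cons.injEq] at hdecomp
      exact hp0 hdecomp.1
    | cons q0 pre' =>
      simp only [List.cons_append, List.cons.injEq] at hdecomp
      obtain ⟨hq0, hprest⟩ := hdecomp
      subst hq0
      cases suf with
      | nil =>
        exfalso
        apply hlast
        rw [hprest, show p0 :: (pre' ++ [[]] : List (List Char)) = (p0 :: pre') ++ [[]] from rfl]
        exact List.getLast?_concat
      | cons s1 suf' =>
        have hlen2 : ops.length = pre'.length + (2 + suf'.length) := by
          rw [hlen, hprest]
          simp [List.length_append]
          omega
        have hoal : (ops.take pre'.length).length = pre'.length := by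
          simp [List.length_take]
          omega
        have hops : ops = ops.take pre'.length ++ ops.drop pre'.length :=
          (List.take_append_drop _ _).symm
        have hrl : (ops.drop pre'.length).length = 2 + suf'.length := by
          simp [List.length_drop]
          omega
        set oa := ops.take pre'.length with hoa_def
        obtain ⟨a, rest2, hrest⟩ : ∃ a rest2, ops.drop pre'.length = a :: rest2 := by
          cases h : ops.drop pre'.length with
          | nil => rw [h] at hrl; simp only [List.length_nil] at hrl; omega
          | cons a r => exact ⟨a, r, rfl⟩
        obtain ⟨b, ob, hrest2⟩ : ∃ b ob, rest2 = b :: ob := by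
          cases h : rest2 with
          | nil => rw [h] at hrest; rw [hrest] at hrl; simp only [List.length_cons, List.length_nil] at hrl; omega
          | cons b r => exact ⟨b, r, rfl⟩
        rw [hrest2] at hrest
        have hopseq : ops = oa ++ a :: b :: ob := by rw [hops, hrest]
        have hival : i = pre'.length + 1 := by rw [← hlenpre]; simp
        -- unfold one iteration of the while loop
        rw [fcMerge, hi]
        have hg1 : PySem.List.pyGet? ops ((i : Int) - 1) = some a := by
          rw [hopseq, hival]
          have h1 : ((pre'.length + 1 : Nat) : Int) - 1 = ((oa.length : Nat) : Int) := by
            rw [hoal]; push_cast; ring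
          rw [h1]
          exact PySem.List.pyGet?_append_length oa (b :: ob) a
        have hg2 : PySem.List.pyGet? ops (i : Int) = some b := by
          rw [hopseq, hival]
          have h1 : ((pre'.length + 1 : Nat) : Int) = ((oa.length : Nat) : Int) + ((1 : Nat) : Int) := by
            rw [hoal]; push_cast; ring
          rw [h1, PySem.List.pyGet?_append_right oa (a :: b :: ob) 1]
          rfl
        simp only [hg1, hg2]
        have hs1 : PySem.List.slice ops none (some ((i : Int) - 1)) = oa := by
          have h0 : (0 : Int) ≤ (i : Int) - 1 := by rw [hival]; push_cast; omega
          rw [PySem.List.slice_to ops h0, hopseq]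
          have : ((i : Int) - 1).toNat = oa.length := by rw [hival, hoal]; omega
          rw [this, List.take_left]
        have hs2 : PySem.List.slice ops (some ((i : Int) + 1)) none = ob := by
          have h0 : (0 : Int) ≤ (i : Int) + 1 := by positivity
          rw [PySem.List.slice_from ops h0, hopseq]
          have h1 : ((i : Int) + 1).toNat = (oa ++ [a, b]).length := by
            simp [hival, hoal]
            omega
          rw [h1, show oa ++ a :: b :: ob = (oa ++ [a, b]) ++ ob by simp, List.drop_left]
        have herase : (p0 :: prest).eraseIdx i = p0 :: (pre' ++ s1 :: suf') := by
          rw [hprest, hival,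
            show p0 :: (pre' ++ [] :: s1 :: suf') = (p0 :: pre') ++ ([] : List Char) :: (s1 :: suf') from rfl,
            show pre'.length + 1 = (p0 :: pre').length from rfl]
          rw [eraseIdx_append_cons]
          rfl
        rw [hs1, hs2, herase]
        have hcount : List.count ([] : List Char) (p0 :: (pre' ++ s1 :: suf')) = col := by
          rw [hprest] at hc
          simp only [List.count_cons, List.count_append] at hc ⊢
          simp at hc ⊢
          omega
        have hlen' : (oa ++ (a ++ b) :: ob).length = (pre' ++ s1 :: suf').length := by
          have := hrl
          rw [hrest] at this
          simp only [List.length_cons] at this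
          simp [List.length_append, hoal]
          omega
        have hlast' : (p0 :: (pre' ++ s1 :: suf')).getLast? ≠ some [] := by
          have h1 : (p0 :: (pre' ++ s1 :: suf')).getLast? = (s1 :: suf').getLast? := by
            rw [show p0 :: (pre' ++ s1 :: suf') = (p0 :: pre') ++ (s1 :: suf') from rfl]
            exact List.getLast?_append_of_ne_nil _ (by simp)
          have h2 : (p0 :: prest).getLast? = (s1 :: suf').getLast? := by
            rw [hprest, show p0 :: (pre' ++ [] :: s1 :: suf') = (p0 :: pre') ++ (([] : List Char) :: s1 :: suf') from rfl]
            rw [List.getLast?_append_of_ne_nil _ (by simp), List.getLast?_cons_cons]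
          rw [h1, ← h2]
          exact hlast
        rw [show oa ++ [a ++ b] ++ ob = oa ++ (a ++ b) :: ob by simp]
        rw [ih (oa ++ (a ++ b) :: ob) p0 (pre' ++ s1 :: suf') hcount hp0 hlen' hlast']
        rw [hprest, hopseq]
        rw [mrgQ_splice oa pre' a b ob s1 suf' hoal]

theorem grpOf_cons_nop {c : Char} (h : opb c = false) (cs : List Char) :
    grpOf (c :: cs) = grpOf cs := by
  simp [grpOf, opsOf, partsOf_cons_nop h, h]

theorem grpOf_cons_op {c : Char} (h : opb c = true) (cs : List Char) :
    grpOf (c :: cs) = if (partsOf cs).headI = [] ∧ (grpOf cs).1 ≠ []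
      then ((c :: (grpOf cs).1.headI) :: (grpOf cs).1.tail, (grpOf cs).2)
      else ([c] :: (grpOf cs).1, (partsOf cs).headI :: (grpOf cs).2) := by
  have hops : opsOf (c :: cs) = [c] :: opsOf cs := by simp [opsOf, h]
  rw [grpOf, hops, partsOf_cons_op h, List.tail_cons, mrgQ]
  simp only [grpOf, List.singleton_append]

theorem partsOf_getLast : ∀ (cs : List Char) (c : Char), cs.getLast? = some c → opb c = false →
    (partsOf cs).getLast? ≠ some [] := by
  intro cs
  induction cs with
  | nil => intro c h _; simp at h
  | cons d cs ih =>
    intro c h hc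
    cases cs with
    | nil =>
      simp only [List.getLast?_singleton, Option.some.injEq] at h
      subst h
      simp [partsOf, hc]
    | cons e cs' =>
      rw [List.getLast?_cons_cons] at h
      have hrec := ih c h hc
      by_cases hd : opb d = true
      · rw [partsOf_cons_op hd]
        obtain ⟨p, ps, hp⟩ := List.exists_cons_of_ne_nil (partsOf_ne_nil (e :: cs'))
        rw [hp] at hrec ⊢
        rwa [List.getLast?_cons_cons]
      · simp only [Bool.not_eq_true] at hd
        rw [partsOf_cons_nop hd]
        obtain ⟨p, ps, hp⟩ := List.exists_cons_of_ne_nil (partsOf_ne_nil (e :: cs'))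
        rw [hp] at hrec ⊢
        simp only [List.headI_cons, List.tail_cons]
        cases ps with
        | nil => simp
        | cons p2 ps' =>
          rwa [List.getLast?_cons_cons] at hrec ⊢

theorem foldB_char : ∀ (cs : List Char) (ops lst : List (List Char)) (buf : List Char),
    (let r := cs.foldl fcAltStep (ops, lst, buf)
     (r.1, r.2.1 ++ [r.2.2]))
    = if buf = [] ∧ ops ≠ [] ∧ (grpOf cs).1 ≠ [] ∧ (partsOf cs).headI = []
      then (ops.dropLast ++ (ops.getLast?.getD [] ++ (grpOf cs).1.headI) :: (grpOf cs).1.tail,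
            lst ++ (grpOf cs).2)
      else (ops ++ (grpOf cs).1, lst ++ (buf ++ (partsOf cs).headI) :: (grpOf cs).2) := by
  intro cs
  induction cs with
  | nil =>
    intro ops lst buf
    have hg : grpOf [] = ([], []) := rfl
    rw [List.foldl_nil]
    simp [hg, partsOf]
  | cons c cs ih =>
    intro ops lst buf
    rw [List.foldl_cons]
    by_cases hc : opb c = true
    · by_cases hb : buf = [] ∧ ops ≠ []
      · have hbi : buf.isEmpty = true := by simp [hb.1]
        have hoi : ops.isEmpty = false := by simp [hb.2]
        have hstep : fcAltStep (ops, lst, buf) c =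
            (ops.dropLast ++ [ops.getLast?.getD [] ++ [c]], lst, []) := by
          simp [fcAltStep, show (c == '>' || c == '<' || c == '=' || c == '!') = true from hc, hbi, hoi]
        rw [hstep, ih]
        rw [grpOf_cons_op hc, partsOf_cons_op hc]
        by_cases hm : (partsOf cs).headI = [] ∧ (grpOf cs).1 ≠ []
        · rw [if_pos hm]
          rw [if_pos ⟨rfl, by simp, hm.2, hm.1⟩]
          rw [if_pos ⟨hb.1, hb.2, by simp, by simp⟩]
          simp [List.append_assoc]
        · rw [if_neg hm]
          rw [if_neg (by tauto)]
          rw [if_pos ⟨hb.1, hb.2, by simp, by simp⟩]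
          simp [List.append_assoc]
      · have hcond : (buf.isEmpty && !ops.isEmpty) = false := by
          rcases not_and_or.mp hb with h | h
          · simp [List.isEmpty_iff, h]
          · simp [not_not.mp h]
        have hstep : fcAltStep (ops, lst, buf) c = (ops ++ [[c]], lst ++ [buf], []) := by
          simp [fcAltStep, show (c == '>' || c == '<' || c == '=' || c == '!') = true from hc, hcond]
        rw [hstep, ih]
        rw [grpOf_cons_op hc, partsOf_cons_op hc]
        by_cases hm : (partsOf cs).headI = [] ∧ (grpOf cs).1 ≠ []
        · rw [if_pos hm]
          rw [if_pos ⟨rfl, by simp, hm.2, hm.1⟩]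
          rw [if_neg (fun hx => hb ⟨hx.1, hx.2.1⟩)]
          simp [List.append_assoc]
        · rw [if_neg hm]
          rw [if_neg (by tauto)]
          rw [if_neg (fun hx => hb ⟨hx.1, hx.2.1⟩)]
          simp [List.append_assoc]
    · simp only [Bool.not_eq_true] at hc
      have hstep : fcAltStep (ops, lst, buf) c = (ops, lst, buf ++ [c]) := by
        simp [fcAltStep, show (c == '>' || c == '<' || c == '=' || c == '!') = false from hc]
      rw [hstep, ih]
      rw [grpOf_cons_nop hc, partsOf_cons_nop hc]
      rw [if_neg (by simp)]
      rw [if_neg (by rintro ⟨-, -, -, h⟩; simp at h)]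
      simp [List.append_assoc]

-- ===== VERDICT (by name: the statement is the Claim_ definition above) =====
theorem find_comparsion_spec : Claim_equal_find_comparsion := by
  unfold Claim_equal_find_comparsion
  intro stroka _ hpre
  obtain ⟨hne, hall⟩ := hpre
  unfold Spec_find_comparsion find_comparsion find_comparsion_alt
  obtain ⟨c0, rest, hcs⟩ := List.exists_cons_of_ne_nil hne
  have hget0 : PySem.List.pyGet? stroka.toList 0 = some c0 := by
    rw [hcs]; exact PySem.List.pyGet?_zero_cons _ _
  have hlastq : stroka.toList.getLast? = some (stroka.toList.getLast hne) :=
    List.getLast?_eq_some_getLast hne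
  have hgetm1 : PySem.List.pyGet? stroka.toList (-1) = some (stroka.toList.getLast hne) := by
    rw [PySem.List.pyGet?_neg_one]; exact hlastq
  have hhead : stroka.toList.head? = some c0 := by rw [hcs]; rfl
  rw [hhead, hlastq] at hall
  simp at hall
  have hc0mem : c0 ∉ (['>', '<', '!', '='] : List Char) := by
    simp only [List.mem_cons, List.not_mem_nil, not_or]
    tauto
  have hclmem : stroka.toList.getLast hne ∉ (['>', '<', '!', '='] : List Char) := by
    simp only [List.mem_cons, List.not_mem_nil, not_or]
    tauto
  have hcont0 : (['>', '<', '!', '='] : List Char).contains c0 = false := by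
    simpa using hc0mem
  have hcontl : (['>', '<', '!', '='] : List Char).contains (stroka.toList.getLast hne) = false := by
    simpa using hclmem
  -- reduce A's guard
  simp only [hget0, hgetm1, hcont0, hcontl, Bool.or_self, Bool.false_eq_true, if_false]
  -- phase 1 of A
  have hph := phase1 stroka.toList stroka.toList [] [] [] [] (by simp) (by simp)
  simp only [List.nil_append, List.length_nil, Nat.cast_zero] at hph
  rw [Prod.mk.injEq] at hph
  obtain ⟨hop, hlst⟩ := hph
  obtain ⟨p0, prest, hp⟩ := List.exists_cons_of_ne_nil (partsOf_ne_nil stroka.toList)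
  have hheadI : (partsOf stroka.toList).headI = p0 := by rw [hp]; rfl
  have htail : (partsOf stroka.toList).tail = prest := by rw [hp]; rfl
  rw [hheadI, htail] at hlst
  -- facts for merge_eq
  have hopb0 : opb c0 = false := (opb_false_iff c0).mpr hc0mem
  have hp0ne : p0 ≠ [] := by
    have h1 : partsOf stroka.toList = (c0 :: (partsOf rest).headI) :: (partsOf rest).tail := by
      rw [hcs]; exact partsOf_cons_nop hopb0 rest
    rw [hp] at h1
    intro h
    rw [h] at h1
    exact absurd (List.cons.inj h1).1 (by simp)
  have hlenops : (opsOf stroka.toList).length = prest.length := by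
    have := length_partsOf stroka.toList
    rw [hp] at this
    simp at this
    omega
  have hlastne : (p0 :: prest).getLast? ≠ some [] := by
    rw [← hp]
    exact partsOf_getLast stroka.toList _ hlastq ((opb_false_iff _).mpr hclmem)
  have hmerge := merge_eq (List.count [] (p0 :: prest)) (opsOf stroka.toList) p0 prest rfl
    hp0ne hlenops hlastne
  -- B's side
  have hB := foldB_char stroka.toList [] [] []
  rw [if_neg (by rintro ⟨-, h, -⟩; exact h rfl)] at hB
  simp only [List.nil_append] at hB
  rw [Prod.mk.injEq] at hB
  obtain ⟨hB1, hB2⟩ := hB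
  rw [hB1, hB2]
  -- assemble
  rw [hop, hlst]
  have hcolv : PySem.List.count (p0 :: prest) ([] : List Char) = List.count [] (p0 :: prest) :=
    PySem.List.count_eq _ _
  rw [hcolv, hmerge]
  have hgrp : grpOf stroka.toList = mrgQ (opsOf stroka.toList) prest := by
    rw [grpOf, htail]
  rw [hgrp, hheadI]
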